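-- pv_equiv track=rewrite | github.com/xwmp3/rosalind-python | bioinfomatics-stronghold/017.mrna.py | rc_table_2_num_reverse
-- ===== SOURCE A (Python) =====
-- def rc_table_2_num_reverse(table_dict: dict):
--     amino_list, num_list = [], []
--     for key in table_dict.keys():
--         amino = table_dict[key]
--         if amino not in amino_list:
--             amino_list.append(amino)
--             num_list.append(1)
--         else:
--             num_list[amino_list.index(amino)] += 1
--     return amino_list, num_list
-- ===== SOURCE B (Python) =====
-- def rc_table_2_num_reverse(table_dict: dict):
--     def go(vs):
--         if not vs:
--             return [], []
--         head, rest = vs[0], vs[1:]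
--         aminos, nums = go([v for v in rest if v != head])
--         return [head] + aminos, [1 + rest.count(head)] + nums
--     return go(list(table_dict.values()))
-- ===== Notes on version B (the rewrite author's own statement) =====
-- stated objective: alternative
-- what changed: Replaces A's interleaved membership-test/list.index/increment loop over an accumulator pair with a recursive divide-and-conquer: take the first value, count its occurrences in the remainder, filter them all out, and recurse on the filtered tail, building both result lists front-to-back with no membership test and no in-place update.
import Mathlib
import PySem

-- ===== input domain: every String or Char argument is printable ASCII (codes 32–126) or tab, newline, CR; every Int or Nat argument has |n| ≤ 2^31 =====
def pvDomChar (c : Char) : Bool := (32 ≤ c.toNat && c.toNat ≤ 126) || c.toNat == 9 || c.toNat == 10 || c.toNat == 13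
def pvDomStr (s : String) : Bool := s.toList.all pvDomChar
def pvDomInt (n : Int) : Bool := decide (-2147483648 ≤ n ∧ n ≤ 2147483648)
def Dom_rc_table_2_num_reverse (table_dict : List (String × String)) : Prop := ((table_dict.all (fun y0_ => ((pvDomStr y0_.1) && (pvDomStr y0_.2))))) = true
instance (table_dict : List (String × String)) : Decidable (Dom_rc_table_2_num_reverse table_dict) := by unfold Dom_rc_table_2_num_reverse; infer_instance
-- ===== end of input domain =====

-- B replaces A's interleaved membership/index/increment accumulator loop with a recursive
-- decomposition: count the first value in the tail, filter it out, recurse (objective: alternative).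
-- ===== PORT A =====
-- Loop over the dict's keys; 'table_dict[key]' while iterating keys() yields exactly the pair's
-- own value, so the transliteration reads kv.2.
def rc_table_2_num_reverse (table_dict : List (String × String)) : List String × List Int :=
  table_dict.foldl (fun s kv =>
    let amino := kv.2
    if amino ∉ s.1 then
      (s.1 ++ [amino], s.2 ++ [1])
    else
      let i : Int := ((PySem.List.index? s.1 amino).getD 0 : Nat)
      (s.1, PySem.List.pySetD s.2 i (PySem.List.pyGetD s.2 i 0 + 1)))
    ([], [])

-- ===== PORT B =====
-- Python's inner 'go': head/rest split, list-comprehension filter, rest.count(head), recurse.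
def pvGoB : List String → List String × List Int
  | [] => ([], [])
  | head :: rest =>
    let r := pvGoB (rest.filter (fun v => !(v == head)))
    (head :: r.1, (1 + (PySem.List.count rest head : Int)) :: r.2)
termination_by vs => vs.length
decreasing_by
  simp only [List.length_cons, List.length_unattach]
  exact Nat.lt_succ_of_le (le_trans (List.length_filter_le _ _) (by simp))

def rc_table_2_num_reverse_alt (table_dict : List (String × String)) : List String × List Int :=
  pvGoB (table_dict.map Prod.snd)

-- ===== PRECONDITION & SPEC =====
def Spec_rc_table_2_num_reverse (table_dict : List (String × String)) (out : List String × List Int) : Prop := out = rc_table_2_num_reverse_alt table_dict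
instance (table_dict : List (String × String)) (out : List String × List Int) : Decidable (Spec_rc_table_2_num_reverse table_dict out) := by unfold Spec_rc_table_2_num_reverse; infer_instance

-- ===== CLAIM (what is proved, stated in full; the proofs are below) =====
def Claim_equal_rc_table_2_num_reverse : Prop := ∀ (table_dict : List (String × String)), Dom_rc_table_2_num_reverse table_dict → Spec_rc_table_2_num_reverse table_dict (rc_table_2_num_reverse table_dict)

-- ===== LEMMAS AND PROOFS =====

-- A's loop body, named for the proofs (the port keeps the inline lambda; definitional equality).
def pvStepA (s : List String × List Int) (amino : String) : List String × List Int :=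
  if amino ∉ s.1 then
    (s.1 ++ [amino], s.2 ++ [1])
  else
    let i : Int := ((PySem.List.index? s.1 amino).getD 0 : Nat)
    (s.1, PySem.List.pySetD s.2 i (PySem.List.pyGetD s.2 i 0 + 1))

-- The common characterisation: distinct values in first-appearance order, paired with counts.
def pvState (p : List String) : List String × List Int :=
  (PySem.Set.ofList p, (PySem.Set.ofList p).map (fun a => (p.count a : Int)))

theorem pv_map_count_set (l : List String) (v : String) (hn : l.Nodup) (k : Nat)
    (hk : PySem.List.index? l v = some k) (c : String → Int) :
    l.map (fun a => c a + if a = v then 1 else 0) = (l.map c).set k (c v + 1) := by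
  obtain ⟨hkl, hlv, -⟩ := PySem.List.getElem_of_index?_eq_some hk
  apply List.ext_getElem (by simp)
  intro j h1 h2
  have hjl : j < l.length := by simpa using h1
  simp only [List.getElem_map, List.getElem_set]
  by_cases hj : k = j
  · subst hj; simp [hlv]
  · have hne : l[j] ≠ v := by
      intro hvj
      exact hj ((hn.getElem_inj_iff).mp (hlv.trans hvj.symm))
    simp [hj, hne]

theorem pv_count_append_singleton (p : List String) (v a : String) :
    (((p ++ [v]).count a : Int)) = (p.count a : Int) + if a = v then 1 else 0 := by
  rw [List.count_append]
  by_cases hav : a = v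
  · subst hav; simp
  · simp only [List.count_singleton', if_neg hav]
    rw [if_neg (show ¬ v = a from fun h => hav (Eq.symm h))]
    simp

theorem pvStepA_state (p : List String) (v : String) :
    pvStepA (pvState p) v = pvState (p ++ [v]) := by
  by_cases hv : v ∈ p
  · have hmem : v ∈ PySem.Set.ofList p := (PySem.Set.mem_ofList p v).mpr hv
    obtain ⟨k, hk⟩ := Option.isSome_iff_exists.mp ((PySem.List.index?_isSome_iff _ _).mpr hmem)
    obtain ⟨hkl, hlv, -⟩ := PySem.List.getElem_of_index?_eq_some hk
    have hS : PySem.Set.ofList (p ++ [v]) = PySem.Set.ofList p := by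
      rw [PySem.Set.ofList_append_singleton]
      simp [PySem.Set.add, PySem.Set.contains, hmem]
    unfold pvStepA pvState
    rw [if_neg (not_not_intro hmem), hS, hk]
    simp only [Option.getD_some, Prod.mk.injEq, true_and]
    rw [PySem.List.pySetD_natCast, PySem.List.pyGetD_natCast]
    have hget : ((PySem.Set.ofList p).map (fun a => (p.count a : Int))).getD k 0
        = (p.count v : Int) := by
      rw [List.getD_eq_getElem _ _ (by simpa using hkl)]
      simp [hlv]
    rw [hget,
      ← pv_map_count_set (PySem.Set.ofList p) v (PySem.Set.nodup_ofList p) k hk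
        (fun a => (p.count a : Int))]
    apply List.map_congr_left
    intro a _
    rw [pv_count_append_singleton]
  · have hmem : v ∉ PySem.Set.ofList p := fun h => hv ((PySem.Set.mem_ofList p v).mp h)
    have happ : PySem.Set.ofList (p ++ [v]) = PySem.Set.ofList p ++ [v] := by
      rw [PySem.Set.ofList_append_singleton]
      simp [PySem.Set.add, PySem.Set.contains, hmem]
    unfold pvStepA pvState
    rw [if_pos hmem, happ]
    simp only [List.map_append, Prod.mk.injEq, true_and]
    congr 1
    · apply List.map_congr_left
      intro a ha
      rw [pv_count_append_singleton]
      have : a ≠ v := fun h => hmem (h ▸ ha)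
      simp [this]
    · simp [List.count_eq_zero_of_not_mem hv]

theorem pv_foldl_state (vs : List String) : ∀ p : List String,
    vs.foldl pvStepA (pvState p) = pvState (p ++ vs) := by
  induction vs with
  | nil => intro p; simp
  | cons v vs ih =>
    intro p
    rw [List.foldl_cons, pvStepA_state, ih (p ++ [v])]
    simp

-- ofList commutes with filter (first occurrences survive filtering in order).
theorem pv_ofList_filter (p : String → Bool) (xs : List String) :
    PySem.Set.ofList (xs.filter p) = (PySem.Set.ofList xs).filter p := by
  induction xs with
  | nil => simp [PySem.Set.ofList_nil]
  | cons y xs ih =>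
    rw [PySem.Set.ofList_cons]
    by_cases hy : p y = true
    · rw [List.filter_cons_of_pos hy, PySem.Set.ofList_cons, ih,
        List.filter_cons_of_pos hy]
      unfold PySem.Set.discard
      rw [List.filter_filter, List.filter_filter]
      congr 1
      exact List.filter_congr (fun v _ => Bool.and_comm _ _)
    · rw [List.filter_cons_of_neg hy, ih, List.filter_cons_of_neg hy]
      unfold PySem.Set.discard
      rw [List.filter_filter]
      apply List.filter_congr
      intro v _
      by_cases hvy : v = y
      · subst hvy; simp [hy]
      · simp [hvy]

theorem pvGoB_eq_state_aux : ∀ (n : Nat) (vs : List String), vs.length ≤ n → pvGoB vs = pvState vs := by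
  intro n
  induction n with
  | zero =>
    intro vs h
    match vs with
    | [] => rw [pvGoB]; simp [pvState, PySem.Set.ofList_nil]
  | succ n ih =>
    intro vs h
    match vs with
    | [] => rw [pvGoB]; simp [pvState, PySem.Set.ofList_nil]
    | head :: rest =>
    have hlen : (rest.filter (fun v => !(v == head))).length ≤ n :=
      le_trans (List.length_filter_le _ _) (Nat.le_of_succ_le_succ (by simpa using h))
    rw [pvGoB, ih _ hlen]
    unfold pvState
    have hS : PySem.Set.ofList (head :: rest)
        = head :: PySem.Set.ofList (rest.filter (fun v => !(v == head))) := by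
      rw [PySem.Set.ofList_cons, pv_ofList_filter]
      rfl
    rw [hS]
    simp only [List.map_cons, Prod.mk.injEq, true_and]
    congr 1
    · rw [PySem.List.count_eq, List.count_cons_self]
      push_cast
      ring
    · apply List.map_congr_left
      intro a ha
      have haf : a ∈ rest.filter (fun v => !(v == head)) := by
        have := (PySem.Set.mem_ofList _ a).mp ha
        exact this
      have hane : ¬ (a == head) = true := by
        have := List.of_mem_filter haf
        simpa using this
      rw [List.count_cons_of_ne (by simpa using (Ne.symm (by simpa using hane : ¬ a = head))),
        List.count_filter (by simpa using hane)]

-- ===== VERDICT (by name: the statement is the Claim_ definition above) =====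
theorem rc_table_2_num_reverse_spec : Claim_equal_rc_table_2_num_reverse := by
  intro t _
  unfold Spec_rc_table_2_num_reverse
  have hA : rc_table_2_num_reverse t = (t.map Prod.snd).foldl pvStepA (pvState []) := by
    rw [List.foldl_map]; rfl
  rw [hA, pv_foldl_state]
  unfold rc_table_2_num_reverse_alt
  rw [pvGoB_eq_state_aux (t.map Prod.snd).length _ le_rfl]
  simp
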